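-- pv_equiv track=rewrite | github.com/wangyichengsh/data_analysis_platform-backend | apps/NormalTask/common.py | getDataType
-- ===== SOURCE A (Python) =====
-- def getDataType(data):
--     data_sample = data[0]
--     for col in data_sample:
--         if data_sample[col] == None:
--             for row in data:
--                 if row[col] != None:
--                     data_sample[col] = row[col]
--                     break
--     return data_sample
-- ===== SOURCE B (Python) =====
-- def getDataType(data):
--     data_sample = data[0]
--     pending = [col for col in data_sample if data_sample[col] == None]
--     for row in data:
--         if not pending:
--             break
--         remaining = []
--         for col in pending:
--             val = row[col]
--             if val != None:
--                 data_sample[col] = val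
--             else:
--                 remaining.append(col)
--         pending = remaining
--     return data_sample
-- ===== Notes on version B (the rewrite author's own statement) =====
-- stated objective: alternative
-- what changed: A is column-major: for each None column of the first row it rescans data from the top; B is row-major: it computes the pending None columns once, then makes a single pass over the rows, resolving pending columns as values appear and stopping when none are pending.
-- outside the precondition, e.g. on getDataType([{'a': None}, {'a': '1'}, {}]): A returns {'a': '1'}, B returns {'a': '1'}
import Mathlib
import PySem

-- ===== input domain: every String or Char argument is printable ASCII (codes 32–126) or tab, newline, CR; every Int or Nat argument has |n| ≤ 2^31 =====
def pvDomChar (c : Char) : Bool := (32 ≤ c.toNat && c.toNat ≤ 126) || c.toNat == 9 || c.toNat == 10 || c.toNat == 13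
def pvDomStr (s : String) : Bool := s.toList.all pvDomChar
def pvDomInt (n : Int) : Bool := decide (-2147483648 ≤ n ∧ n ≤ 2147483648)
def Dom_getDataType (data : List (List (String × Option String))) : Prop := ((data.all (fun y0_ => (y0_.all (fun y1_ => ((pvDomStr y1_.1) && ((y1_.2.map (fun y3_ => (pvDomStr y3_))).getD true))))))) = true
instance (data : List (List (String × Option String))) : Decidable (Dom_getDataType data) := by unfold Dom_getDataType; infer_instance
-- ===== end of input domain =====

-- B replaces A's column-major rescans (one pass over data per None column of the first row) by a
-- single row-major pass over data with a pending-columns worklist; same return value (both Pythons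
-- mutate and return the first-row dict data[0] in place — the equivalence is about the return value).

-- ===== PORT A =====
-- inner loop 'for row in data: if row[col] != None: data_sample[col] = row[col]; break'
-- (Python raises KeyError when a scanned row lacks col; here a missing key is passed over —
-- inputs on which the Python raises are excluded by Pre_getDataType)
def pvScanCol (rows : List (List (String × Option String))) (col : String) : Option String :=
  match rows with
  | [] => none
  | row :: rest =>
    match ((PySem.Dict.mk row).get? col).join with
    | some v => some v
    | none => pvScanCol rest col

-- body of A's outer loop over the keys of data_sample; data[0] is the dict being mutated, so the
-- inner scan sees the current state ds as its first row
def pvColStep (rest : List (List (String × Option String)))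
    (ds : PySem.Dict String (Option String)) (col : String) :
    PySem.Dict String (Option String) :=
  if ds.get? col == some none then
    match pvScanCol (ds.items :: rest) col with
    | some v => ds.insert col (some v)
    | none => ds
  else ds

def getDataType (data : List (List (String × Option String))) : List (String × Option String) :=
  match data with
  | [] => []   -- data[0] raises IndexError on empty data; excluded by Pre_getDataType
  | d0 :: rest =>
    ((d0.map Prod.fst).foldl (pvColStep rest) (PySem.Dict.mk d0)).items

-- ===== PORT B =====
-- inner loop over the pending snapshot: 'val = row[col]; if val != None: data_sample[col] = val
-- else: remaining.append(col)' (missing key: KeyError in Python, excluded by Pre_getDataType)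
def pvStepRow (row : List (String × Option String)) (pending : List String)
    (ds : PySem.Dict String (Option String)) :
    PySem.Dict String (Option String) × List String :=
  match pending with
  | [] => (ds, [])
  | col :: cs =>
    match ((PySem.Dict.mk row).get? col).join with
    | some v => pvStepRow row cs (ds.insert col (some v))
    | none =>
      let r := pvStepRow row cs ds
      (r.1, col :: r.2)

-- outer loop 'for row in data: if not pending: break; …'
def pvLoopRows (rows : List (List (String × Option String)))
    (ds : PySem.Dict String (Option String)) (pending : List String) :
    PySem.Dict String (Option String) :=
  match rows with
  | [] => ds
  | row :: rest =>
    if pending.isEmpty then ds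
    else
      let r := pvStepRow row pending ds
      pvLoopRows rest r.1 r.2

def getDataType_alt (data : List (List (String × Option String))) : List (String × Option String) :=
  match data with
  | [] => []
  | d0 :: _ =>
    let ds := PySem.Dict.mk d0
    let pending := (d0.map Prod.fst).filter (fun col => ds.get? col == some none)
    (pvLoopRows data ds pending).items

-- ===== PRECONDITION & SPEC =====
-- Pre_ excludes: empty data (data[0] raises IndexError); rows whose key list has duplicates (not
-- representable as a Python dict, so no Python input is excluded by this clause); and data where a
-- None-valued column of the first row is missing from some row (row[col] raises KeyError in
-- general; when the scan happens to break before reaching such a row A still returns — see the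
-- cite in claim.json, where A and B return the same value).
def Pre_getDataType (data : List (List (String × Option String))) : Prop :=
  data ≠ [] ∧
  (∀ row ∈ data, (row.map Prod.fst).Nodup) ∧
  (∀ p ∈ data.headD [], p.2 = none → ∀ row ∈ data, p.1 ∈ row.map Prod.fst)

instance (data : List (List (String × Option String))) : Decidable (Pre_getDataType data) := by
  unfold Pre_getDataType; infer_instance

def pvWitness_getDataType : (List (List (String × Option String))) :=
  [[("a", none), ("b", some "1")], [("a", some "2")]]

def Spec_getDataType (data : List (List (String × Option String))) (out : List (String × Option String)) : Prop := out = getDataType_alt data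
instance (data : List (List (String × Option String))) (out : List (String × Option String)) : Decidable (Spec_getDataType data out) := by unfold Spec_getDataType; infer_instance

-- ===== CLAIM (what is proved, stated in full; the proofs are below) =====
def Claim_equal_getDataType : Prop := ∀ (data : List (List (String × Option String))), Dom_getDataType data → Pre_getDataType data → Spec_getDataType data (getDataType data)

-- ===== LEMMAS AND PROOFS =====

-- overwriting an existing key rewrites that key's entry in place
theorem pv_insert_items_map (ds : PySem.Dict String (Option String)) (c : String)
    (w : Option String) (hc : c ∈ ds.keys) :
    (ds.insert c w).items = ds.items.map (fun p => if p.1 = c then (p.1, w) else p) := by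
  rw [PySem.Dict.items_insert_of_contains ds w ((PySem.Dict.contains_iff_mem_keys ds c).mpr hc)]
  refine List.map_congr_left fun p _ => ?_
  by_cases h : p.1 = c <;> simp [h]

theorem pv_insert_keys (ds : PySem.Dict String (Option String)) (c : String)
    (w : Option String) (hc : c ∈ ds.keys) :
    (ds.insert c w).keys = ds.keys := by
  simp only [PySem.Dict.keys, pv_insert_items_map ds c w hc, List.map_map]
  refine List.map_congr_left fun p _ => ?_
  by_cases h : p.1 = c <;> simp [h]

-- characterisation of B's inner (per-row) loop
theorem pv_stepRow_items (row : List (String × Option String)) :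
    ∀ (pending : List String) (ds : PySem.Dict String (Option String)),
    ds.keys.Nodup → (∀ c ∈ pending, c ∈ ds.keys) →
    (pvStepRow row pending ds).1.items
      = ds.items.map (fun p =>
          if p.1 ∈ pending ∧ ((PySem.Dict.mk row).get? p.1).join ≠ none
          then (p.1, ((PySem.Dict.mk row).get? p.1).join) else p)
    ∧ (pvStepRow row pending ds).2
      = pending.filter (fun c => ((PySem.Dict.mk row).get? c).join == none) := by
  intro pending
  induction pending with
  | nil => intro ds hnd hsub; exact ⟨by simp [pvStepRow], by simp [pvStepRow]⟩
  | cons c cs ih =>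
    intro ds hnd hsub
    have hc : c ∈ ds.keys := hsub c (by simp)
    have hcs : ∀ x ∈ cs, x ∈ ds.keys := fun x hx => hsub x (by simp [hx])
    cases hJ : ((PySem.Dict.mk row).get? c).join with
    | some v =>
      have hkeys := pv_insert_keys ds c (some v) hc
      obtain ⟨ih1, ih2⟩ := ih (ds.insert c (some v)) (by rw [hkeys]; exact hnd)
        (fun x hx => by rw [hkeys]; exact hcs x hx)
      constructor
      · simp only [pvStepRow, hJ]
        rw [ih1, pv_insert_items_map ds c (some v) hc, List.map_map]
        refine List.map_congr_left fun p _ => ?_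
        by_cases hpc : p.1 = c
        · subst hpc
          by_cases hm : p.1 ∈ cs <;> simp [hm, hJ]
        · simp [hpc]
      · simp only [pvStepRow, hJ]
        rw [ih2, List.filter_cons]
        simp [hJ]
    | none =>
      obtain ⟨ih1, ih2⟩ := ih ds hnd hcs
      constructor
      · simp only [pvStepRow, hJ]
        rw [ih1]
        refine List.map_congr_left fun p _ => ?_
        by_cases hpc : p.1 = c
        · subst hpc; simp [hJ]
        · simp [hpc]
      · simp only [pvStepRow, hJ]
        rw [ih2, List.filter_cons]
        simp [hJ]

-- characterisation of B's outer loop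
theorem pv_loopRows_items :
    ∀ (rows : List (List (String × Option String)))
      (ds : PySem.Dict String (Option String)) (pending : List String),
    ds.keys.Nodup → (∀ c ∈ pending, c ∈ ds.keys) →
    (pvLoopRows rows ds pending).items
      = ds.items.map (fun p =>
          if p.1 ∈ pending ∧ pvScanCol rows p.1 ≠ none
          then (p.1, pvScanCol rows p.1) else p) := by
  intro rows
  induction rows with
  | nil => intro ds pending hnd hsub; simp [pvLoopRows, pvScanCol]
  | cons row rest ih =>
    intro ds pending hnd hsub
    cases hp : pending.isEmpty with
    | true =>
      have hpe : pending = [] := List.isEmpty_iff.mp hp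
      subst hpe
      simp [pvLoopRows]
    | false =>
      obtain ⟨h1, h2⟩ := pv_stepRow_items row pending ds hnd hsub
      have hkeys : (pvStepRow row pending ds).1.keys = ds.keys := by
        simp only [PySem.Dict.keys, h1, List.map_map]
        refine List.map_congr_left fun p _ => ?_
        by_cases h : p.1 ∈ pending ∧ ((PySem.Dict.mk row).get? p.1).join ≠ none <;> simp [h]
      have hsub2 : ∀ c ∈ (pvStepRow row pending ds).2, c ∈ (pvStepRow row pending ds).1.keys := by
        intro x hx
        rw [hkeys]
        rw [h2] at hx
        exact hsub x (List.mem_of_mem_filter hx)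
      simp only [pvLoopRows, hp, Bool.false_eq_true, if_false]
      rw [ih _ _ (by rw [hkeys]; exact hnd) hsub2, h1, List.map_map]
      refine List.map_congr_left fun p _ => ?_
      by_cases hmem : p.1 ∈ pending
      · cases hJ : ((PySem.Dict.mk row).get? p.1).join with
        | some v =>
          have hscan : pvScanCol (row :: rest) p.1 = some v := by
            simp [pvScanCol, hJ]
          have hnr : p.1 ∉ (pvStepRow row pending ds).2 := by
            rw [h2]; simp [List.mem_filter, hJ]
          simp [hmem, hJ, hscan, hnr]
        | none =>
          have hscan : pvScanCol (row :: rest) p.1 = pvScanCol rest p.1 := by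
            simp [pvScanCol, hJ]
          have hr : p.1 ∈ (pvStepRow row pending ds).2 := by
            rw [h2]; simp [List.mem_filter, hmem, hJ]
          simp [hmem, hJ, hscan, hr]
      · have hnr : p.1 ∉ (pvStepRow row pending ds).2 := by
          rw [h2]; intro hx; exact hmem (List.mem_of_mem_filter hx)
        simp [hmem, hnr]

-- characterisation of A's fold over the first row's keys
theorem pv_foldA_items (rest : List (List (String × Option String))) :
    ∀ (ks : List String) (ds : PySem.Dict String (Option String)),
    ds.keys.Nodup → (∀ c ∈ ks, c ∈ ds.keys) →
    (ks.foldl (pvColStep rest) ds).items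
      = ds.items.map (fun p =>
          if p.1 ∈ ks ∧ p.2 = none then (p.1, pvScanCol rest p.1) else p) := by
  intro ks
  induction ks with
  | nil => intro ds hnd hsub; simp
  | cons c ks ih =>
    intro ds hnd hsub
    have hc : c ∈ ds.keys := hsub c (by simp)
    have hks : ∀ x ∈ ks, x ∈ ds.keys := fun x hx => hsub x (by simp [hx])
    rw [List.foldl_cons]
    by_cases hg : ds.get? c = some none
    · have heta : (PySem.Dict.mk ds.items).get? c = ds.get? c := rfl
      have hscan : pvScanCol (ds.items :: rest) c = pvScanCol rest c := by
        simp [pvScanCol, heta, hg]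
      have hbody : pvColStep rest ds c
          = match pvScanCol rest c with
            | some v => ds.insert c (some v)
            | none => ds := by
        simp [pvColStep, hg, hscan]
      cases hS : pvScanCol rest c with
      | none =>
        rw [hbody, hS, ih ds hnd hks]
        refine List.map_congr_left fun p hp => ?_
        by_cases hpc : p.1 = c
        · have hval : p.2 = none := by
            have := PySem.Dict.get?_of_mem_items ds (k := p.1) (v := p.2)
              (by simpa using hp) hnd
            rw [hpc, hg] at this
            exact (Option.some.injEq _ _ ▸ this).symm
          by_cases hm : p.1 ∈ ks <;>
            simp [hpc, hval, hS, Prod.ext_iff]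
        · simp [hpc]
      | some v =>
        rw [hbody, hS]
        have hkeys := pv_insert_keys ds c (some v) hc
        rw [ih (ds.insert c (some v)) (by rw [hkeys]; exact hnd)
             (fun x hx => by rw [hkeys]; exact hks x hx),
           pv_insert_items_map ds c (some v) hc, List.map_map]
        refine List.map_congr_left fun p hp => ?_
        by_cases hpc : p.1 = c
        · have hval : p.2 = none := by
            have := PySem.Dict.get?_of_mem_items ds (k := p.1) (v := p.2)
              (by simpa using hp) hnd
            rw [hpc, hg] at this
            exact (Option.some.injEq _ _ ▸ this).symm
          subst hpc
          simp [hval, hS]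
        · simp [hpc]
    · have hbody : pvColStep rest ds c = ds := by
        simp [pvColStep, hg]
      rw [hbody, ih ds hnd hks]
      refine List.map_congr_left fun p hp => ?_
      by_cases hpc : p.1 = c
      · have hval : ds.get? p.1 = some p.2 :=
          PySem.Dict.get?_of_mem_items ds (by simpa using hp) hnd
        have hv2 : p.2 ≠ none := by
          intro h
          apply hg
          rw [← hpc, ← h]
          exact hval
        simp [hpc, hv2]
      · simp [hpc]

-- ===== VERDICT (by name: the statement is the Claim_ definition above) =====
theorem getDataType_spec : Claim_equal_getDataType := by
  intro data _ hpre
  obtain ⟨hne, hnd, -⟩ := hpre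
  cases data with
  | nil => exact absurd rfl hne
  | cons d0 rest =>
    show getDataType (d0 :: rest) = getDataType_alt (d0 :: rest)
    have hnd0 : (PySem.Dict.mk d0).keys.Nodup := by
      simpa [PySem.Dict.keys_mk] using hnd d0 (by simp)
    have hsubA : ∀ x ∈ d0.map Prod.fst, x ∈ (PySem.Dict.mk d0).keys := by
      intro x hx; simpa [PySem.Dict.keys_mk] using hx
    have hsubB : ∀ x ∈ (d0.map Prod.fst).filter
        (fun col => (PySem.Dict.mk d0).get? col == some none), x ∈ (PySem.Dict.mk d0).keys := by
      intro x hx; exact hsubA x (List.mem_of_mem_filter hx)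
    simp only [getDataType, getDataType_alt]
    rw [pv_foldA_items rest (d0.map Prod.fst) (PySem.Dict.mk d0) hnd0 hsubA,
       pv_loopRows_items (d0 :: rest) (PySem.Dict.mk d0) _ hnd0 hsubB]
    refine List.map_congr_left fun p hp => ?_
    have hget : (PySem.Dict.mk d0).get? p.1 = some p.2 :=
      PySem.Dict.get?_of_mem_items (PySem.Dict.mk d0) (by simpa using hp) hnd0
    have hmemk : p.1 ∈ d0.map Prod.fst := List.mem_map.mpr ⟨p, hp, rfl⟩
    by_cases hv : p.2 = none
    · have hpend : p.1 ∈ (d0.map Prod.fst).filter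
          (fun col => (PySem.Dict.mk d0).get? col == some none) := by
        simp [List.mem_filter, hmemk, hget, hv]
      have hscan : pvScanCol (d0 :: rest) p.1 = pvScanCol rest p.1 := by
        simp [pvScanCol, hget, hv]
      cases hS : pvScanCol rest p.1 with
      | some v => simp [hmemk, hv, hpend, hscan, hS]
      | none => simp [hmemk, hv, hpend, hscan, hS, Prod.ext_iff]
    · have hpend : p.1 ∉ (d0.map Prod.fst).filter
          (fun col => (PySem.Dict.mk d0).get? col == some none) := by
        simp [List.mem_filter, hget, hv]
      simp [hv, hpend]
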